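-- pv_equiv track=rewrite | github.com/MalliKarjun008/python-coding-challenges | challenge_39_alternating_square_pattern.py | alternating_square_pattern
-- ===== SOURCE A (Python) =====
-- def alternating_square_pattern(n):
--     if not isinstance(n,int) or n<=0:
--         raise ValueError("Input must be a positive integer")
--     pattern=[]
--     sign=1
--     num=1
--     for i in range(1,n+1):
--         row=[]
--         for j in range(i):
--             row.append(str(num*num*sign))
--             num+=1
--             sign*=-1
--         pattern.append(' '.join(row))
--     return pattern
-- ===== SOURCE B (Python) =====
-- def alternating_square_pattern(n):
--     if not isinstance(n, int) or n <= 0: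
--         raise ValueError("Input must be a positive integer")
--     total = n * (n + 1) // 2
--     vals = [str(k * k if k % 2 else -(k * k)) for k in range(1, total + 1)]
--     rows = []
--     idx = 0
--     for r in range(1, n + 1):
--         rows.append(' '.join(vals[idx:idx + r]))
--         idx += r
--     return rows
-- ===== Notes on version B (the rewrite author's own statement) =====
-- stated objective: alternative
-- what changed: Replaces A's nested loop threading running num/sign accumulators with a closed-form flat list of signed squares (k*k if k odd else -k*k for k=1..n(n+1)/2) that is then chunked into rows of sizes 1..n by slicing.
import Mathlib
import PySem

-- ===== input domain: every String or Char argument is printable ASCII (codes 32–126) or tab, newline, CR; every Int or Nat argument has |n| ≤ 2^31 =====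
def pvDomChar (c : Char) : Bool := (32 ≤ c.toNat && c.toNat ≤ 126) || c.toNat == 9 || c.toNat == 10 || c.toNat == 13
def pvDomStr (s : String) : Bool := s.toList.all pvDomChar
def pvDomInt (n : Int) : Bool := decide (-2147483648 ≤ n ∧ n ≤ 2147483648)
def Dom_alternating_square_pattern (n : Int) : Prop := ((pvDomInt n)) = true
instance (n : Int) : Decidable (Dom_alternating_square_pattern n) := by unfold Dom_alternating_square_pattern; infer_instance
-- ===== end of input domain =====

-- B builds the flat closed-form list of signed squares and chunks it into rows by slicing,
-- instead of A's nested loop threading running num/sign accumulators (objective: alternative).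

-- ===== PORT A =====
-- outer state: (pattern, sign, num); inner loop appends str(num*num*sign), steps num and sign
def alternating_square_pattern (n : Int) : List String :=
  ((PySem.List.pyRange 1 (n + 1) 1).foldl
    (fun (st : List String × Int × Int) i =>
      let inner := (PySem.List.pyRange 0 i 1).foldl
        (fun (st2 : List String × Int × Int) _ =>
          (st2.1 ++ [PySem.Int.toStr (st2.2.2 * st2.2.2 * st2.2.1)],
           st2.2.1 * (-1), st2.2.2 + 1))
        ([], st.2.1, st.2.2)
      (st.1 ++ [PySem.Str.join " " inner.1], inner.2))
    ([], 1, 1)).1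

-- ===== PORT B =====
-- flat closed-form values, then chunk into rows of sizes 1..n by slicing; state: (rows, idx)
def alternating_square_pattern_alt (n : Int) : List String :=
  let total := PySem.Int.floordiv (n * (n + 1)) 2
  let vals := (PySem.List.pyRange 1 (total + 1) 1).map
    (fun k => PySem.Int.toStr (if PySem.Int.mod k 2 ≠ 0 then k * k else -(k * k)))
  ((PySem.List.pyRange 1 (n + 1) 1).foldl
    (fun (st : List String × Int) r =>
      (st.1 ++ [PySem.Str.join " " (PySem.List.slice vals (some st.2) (some (st.2 + r)))],
       st.2 + r))
    ([], 0)).1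

-- ===== PRECONDITION & SPEC =====
-- A raises ValueError for n <= 0 (B does too); Pre_ admits exactly the positive inputs.
def Pre_alternating_square_pattern (n : Int) : Prop := 0 < n
instance (n : Int) : Decidable (Pre_alternating_square_pattern n) := by
  unfold Pre_alternating_square_pattern; infer_instance
def pvWitness_alternating_square_pattern : Int := (3)

def Spec_alternating_square_pattern (n : Int) (out : List String) : Prop := out = alternating_square_pattern_alt n
instance (n : Int) (out : List String) : Decidable (Spec_alternating_square_pattern n out) := by unfold Spec_alternating_square_pattern; infer_instance

-- ===== CLAIM (what is proved, stated in full; the proofs are below) =====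
def Claim_equal_alternating_square_pattern : Prop := ∀ (n : Int), Dom_alternating_square_pattern n → Pre_alternating_square_pattern n → Spec_alternating_square_pattern n (alternating_square_pattern n)

-- ===== LEMMAS AND PROOFS =====

-- the value string of the k-th element, as B writes it
def elemB (k : Int) : String :=
  PySem.Int.toStr (if PySem.Int.mod k 2 ≠ 0 then k * k else -(k * k))

-- A's running sign as a function of the running num
def sgn (m : Int) : Int := if PySem.Int.mod m 2 = 1 then 1 else -1

-- triangular numbers
def TN : Nat → Nat
  | 0 => 0
  | i + 1 => TN i + (i + 1)

-- the common row description and row list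
def rowStr (s : Int) (r : Nat) : String :=
  PySem.Str.join " " ((PySem.List.pyRange s (s + (r : Int)) 1).map elemB)

def rowsSpec : Nat → List String
  | 0 => []
  | i + 1 => rowsSpec i ++ [rowStr ((TN i : Int) + 1) (i + 1)]

lemma mod_two_cases (m : Int) : PySem.Int.mod m 2 = 0 ∨ PySem.Int.mod m 2 = 1 := by
  have h1 := PySem.Int.mod_nonneg m (b := 2) (by omega)
  have h2 := PySem.Int.mod_lt m (b := 2) (by omega)
  omega

lemma elemB_eq (m : Int) : PySem.Int.toStr (m * m * sgn m) = elemB m := by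
  rcases mod_two_cases m with h | h
  · simp only [sgn, elemB, h]
    norm_num
  · simp only [sgn, elemB, h]
    norm_num

lemma sgn_step (m : Int) : sgn m * (-1) = sgn (m + 1) := by
  have h := PySem.Int.mod_eq_zero_iff_dvd m 2
  have h' := PySem.Int.mod_eq_zero_iff_dvd (m + 1) 2
  rcases mod_two_cases m with hm | hm <;> rcases mod_two_cases (m + 1) with hm' | hm' <;>
    simp only [sgn, hm, hm'] <;> norm_num <;> omega

lemma inner_general (L : List Int) : ∀ (row : List String) (m : Int),
    L.foldl
      (fun (st2 : List String × Int × Int) _ =>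
        (st2.1 ++ [PySem.Int.toStr (st2.2.2 * st2.2.2 * st2.2.1)],
         st2.2.1 * (-1), st2.2.2 + 1))
      (row, sgn m, m)
    = (row ++ (PySem.List.pyRange m (m + (L.length : Int)) 1).map elemB,
       sgn (m + (L.length : Int)), m + (L.length : Int)) := by
  induction L with
  | nil => intro row m; simp [PySem.List.pyRange_one_eq_nil]
  | cons a L ih =>
    intro row m
    have hrange : PySem.List.pyRange m (m + ((L.length + 1 : Nat) : Int)) 1
        = m :: PySem.List.pyRange (m + 1) ((m + 1) + (L.length : Int)) 1 := by
      have e : m + ((L.length + 1 : Nat) : Int) = (m + 1) + (L.length : Int) := by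
        push_cast; omega
      rw [e, PySem.List.pyRange_one_cons (by omega)]
    simp only [List.foldl_cons, sgn_step, elemB_eq, List.length_cons]
    rw [ih (row ++ [elemB m]) (m + 1), hrange]
    simp only [List.map_cons, List.append_assoc, List.singleton_append, Prod.mk.injEq]
    push_cast
    ring_nf
    simp

lemma outerA (i : Nat) :
    (PySem.List.pyRange 1 ((i : Int) + 1) 1).foldl
      (fun (st : List String × Int × Int) i =>
        let inner := (PySem.List.pyRange 0 i 1).foldl
          (fun (st2 : List String × Int × Int) _ =>
            (st2.1 ++ [PySem.Int.toStr (st2.2.2 * st2.2.2 * st2.2.1)],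
             st2.2.1 * (-1), st2.2.2 + 1))
          ([], st.2.1, st.2.2)
        (st.1 ++ [PySem.Str.join " " inner.1], inner.2))
      ([], 1, 1)
    = (rowsSpec i, sgn ((TN i : Int) + 1), (TN i : Int) + 1) := by
  induction i with
  | zero =>
    have h1 : sgn 1 = 1 := by decide
    simp [PySem.List.pyRange_one_eq_nil, rowsSpec, TN, h1]
  | succ i ih =>
    have hsplit : PySem.List.pyRange 1 (((i + 1 : Nat) : Int) + 1) 1
        = PySem.List.pyRange 1 ((i : Int) + 1) 1 ++ [(i : Int) + 1] := by
      have h := PySem.List.pyRange_one_succ_right (a := 1) (b := (i : Int) + 1) (by omega)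
      have e : (((i + 1 : Nat)) : Int) + 1 = ((i : Int) + 1) + 1 := by push_cast; omega
      rw [e, h]
    rw [hsplit, List.foldl_append, ih]
    simp only [List.foldl_cons, List.foldl_nil]
    have hlen : ((PySem.List.pyRange 0 ((i : Int) + 1) 1).length : Int) = (i : Int) + 1 := by
      rw [PySem.List.length_pyRange_one]; omega
    rw [inner_general, hlen]
    simp only [rowsSpec, rowStr, TN, List.nil_append, Prod.mk.injEq]
    push_cast
    ring_nf
    simp

lemma TN_double (m : Nat) : 2 * TN m = m * (m + 1) := by
  induction m with
  | zero => rfl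
  | succ i ih => simp only [TN]; ring_nf; ring_nf at ih; omega

lemma TN_mono {i j : Nat} (h : i ≤ j) : TN i ≤ TN j := by
  induction j with
  | zero => have hi : i = 0 := by omega
            subst hi; exact le_refl _
  | succ j ih =>
    by_cases h' : i ≤ j
    · have := ih h'; simp only [TN]; omega
    · have hi : i = j + 1 := by omega
      subst hi; exact le_refl _

-- a middle chunk of the flat value list is exactly one row's contents
lemma chunk_eq (T a r : Nat) (h : a + r ≤ T) :
    (((PySem.List.pyRange 1 ((T : Int) + 1) 1).map elemB).drop a).take r
    = (PySem.List.pyRange ((a : Int) + 1) ((a : Int) + 1 + (r : Int)) 1).map elemB := by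
  have hsplit1 : PySem.List.pyRange 1 ((T : Int) + 1) 1
      = PySem.List.pyRange 1 ((a : Int) + 1) 1
        ++ PySem.List.pyRange ((a : Int) + 1) ((T : Int) + 1) 1 :=
    PySem.List.pyRange_one_append 1 ((a : Int) + 1) ((T : Int) + 1)
      (by omega) (by omega)
  have hsplit2 : PySem.List.pyRange ((a : Int) + 1) ((T : Int) + 1) 1
      = PySem.List.pyRange ((a : Int) + 1) ((a : Int) + 1 + (r : Int)) 1
        ++ PySem.List.pyRange ((a : Int) + 1 + (r : Int)) ((T : Int) + 1) 1 :=
    PySem.List.pyRange_one_append ((a : Int) + 1) ((a : Int) + 1 + (r : Int)) ((T : Int) + 1)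
      (by omega) (by omega)
  have hlen1 : ((PySem.List.pyRange 1 ((a : Int) + 1) 1).map elemB).length = a := by
    simp [PySem.List.length_pyRange_one]
  have hlen2 : ((PySem.List.pyRange ((a : Int) + 1) ((a : Int) + 1 + (r : Int)) 1).map elemB).length = r := by
    simp [PySem.List.length_pyRange_one]
  rw [hsplit1, hsplit2]
  simp only [List.map_append]
  rw [List.drop_left' hlen1, List.take_left' hlen2]

lemma outerB (m : Nat) : ∀ (i : Nat), i ≤ m →
    (PySem.List.pyRange 1 ((i : Int) + 1) 1).foldl
      (fun (st : List String × Int) r =>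
        (st.1 ++ [PySem.Str.join " "
          (PySem.List.slice ((PySem.List.pyRange 1 ((TN m : Int) + 1) 1).map elemB)
            (some st.2) (some (st.2 + r)))],
         st.2 + r))
      ([], 0)
    = (rowsSpec i, (TN i : Int)) := by
  intro i hi
  induction i with
  | zero => simp [PySem.List.pyRange_one_eq_nil, rowsSpec, TN]
  | succ i ih =>
    have hsplit : PySem.List.pyRange 1 (((i + 1 : Nat) : Int) + 1) 1
        = PySem.List.pyRange 1 ((i : Int) + 1) 1 ++ [(i : Int) + 1] := by
      have h := PySem.List.pyRange_one_succ_right (a := 1) (b := (i : Int) + 1) (by omega)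
      have e : (((i + 1 : Nat)) : Int) + 1 = ((i : Int) + 1) + 1 := by push_cast; omega
      rw [e, h]
    rw [hsplit, List.foldl_append, ih (by omega)]
    simp only [List.foldl_cons, List.foldl_nil]
    have hb : (TN i : Int) + ((i : Int) + 1) = ((TN i + (i + 1) : Nat) : Int) := by push_cast; omega
    have hslice : PySem.List.slice ((PySem.List.pyRange 1 ((TN m : Int) + 1) 1).map elemB)
        (some (TN i : Int)) (some ((TN i : Int) + ((i : Int) + 1)))
        = (PySem.List.pyRange ((TN i : Int) + 1) ((TN i : Int) + 1 + ((i + 1 : Nat) : Int)) 1).map elemB := by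
      rw [hb, PySem.List.slice_natCast]
      have : TN i + (i + 1) - TN i = i + 1 := by omega
      rw [this]
      have hle : TN i + (i + 1) ≤ TN m := by
        have : TN (i + 1) ≤ TN m := TN_mono (by omega)
        simp [TN] at this; omega
      exact chunk_eq (TN m) (TN i) (i + 1) hle
    rw [hslice]
    simp only [rowsSpec, rowStr, TN, Prod.mk.injEq]
    refine ⟨by trivial, ?_⟩
    push_cast; omega

lemma TN_floordiv (m : Nat) :
    PySem.Int.floordiv ((m : Int) * ((m : Int) + 1)) 2 = (TN m : Int) := by
  have h := TN_double m
  have hcast : (m : Int) * ((m : Int) + 1) = ((m * (m + 1) : Nat) : Int) := by push_cast; ring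
  rw [hcast]
  rw [show ((2 : Int)) = ((2 : Nat) : Int) from rfl, PySem.Int.floordiv_natCast]
  congr 1
  omega

-- ===== VERDICT (by name: the statement is the Claim_ definition above) =====
theorem alternating_square_pattern_spec : Claim_equal_alternating_square_pattern := by
  intro n _ hpre
  have hpos : (0 : Int) < n := hpre
  have hm : n = ((n.toNat : Nat) : Int) := by omega
  unfold Spec_alternating_square_pattern alternating_square_pattern alternating_square_pattern_alt
  rw [hm]
  rw [outerA n.toNat]
  rw [TN_floordiv n.toNat]
  exact (congrArg Prod.fst (outerB n.toNat n.toNat (le_refl _))).symm
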